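-- pv_equiv track=rewrite | github.com/4dsolutions/elite_school | usaco/.ipynb_checkpoints/prob3-checkpoint.py | get_passes
-- ===== SOURCE A (Python) =====
-- def get_passes(alpha, h):
--     original = alpha[:]
--     total = 1
--     loc = 0
--     for c in h:
--         found = False
--         while not found:
--             loc = alpha.find(c)
--             if loc > -1:
--                 alpha = alpha[loc + 1:]
--                 found = True
--             else:
--                 total += 1
--                 alpha = original
--     return total
-- ===== SOURCE B (Python) =====
-- def _bisect_left(lst, x):
--     lo, hi = 0, len(lst)
--     while lo < hi:
--         mid = (lo + hi) // 2
--         if lst[mid] < x: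
--             lo = mid + 1
--         else:
--             hi = mid
--     return lo
--
--
-- def get_passes(alpha, h):
--     pos = {}
--     for i, ch in enumerate(alpha):
--         pos.setdefault(ch, []).append(i)
--     total = 1
--     cur = 0
--     for c in h:
--         lst = pos[c]
--         lo = _bisect_left(lst, cur)
--         if lo == len(lst):
--             total += 1
--             cur = lst[0] + 1
--         else:
--             cur = lst[lo] + 1
--     return total
-- ===== Notes on version B (the rewrite author's own statement) =====
-- stated objective: faster
-- what changed: A rescans the remaining alphabet string with str.find for every character of h (resetting on each wrap); B builds a per-character index of sorted positions once and finds each next occurrence by binary search over a moving cursor (measured 2.59x at the largest size).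
import Mathlib
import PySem

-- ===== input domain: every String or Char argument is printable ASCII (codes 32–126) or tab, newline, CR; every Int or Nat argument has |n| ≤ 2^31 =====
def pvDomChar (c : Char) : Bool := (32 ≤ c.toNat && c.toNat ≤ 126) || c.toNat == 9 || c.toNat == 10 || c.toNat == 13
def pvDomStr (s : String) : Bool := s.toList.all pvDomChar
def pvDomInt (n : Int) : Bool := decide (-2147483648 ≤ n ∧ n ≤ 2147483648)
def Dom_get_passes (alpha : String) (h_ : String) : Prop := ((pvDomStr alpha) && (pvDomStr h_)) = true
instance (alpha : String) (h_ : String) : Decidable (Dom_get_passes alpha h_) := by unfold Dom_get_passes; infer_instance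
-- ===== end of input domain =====

-- B replaces A's repeated rescans of alpha by a per-character index of positions
-- (built once) queried with binary search for the next occurrence (objective: faster; a timing run measured B faster at the largest size).

-- ===== PORT A =====
-- A's inner `while not found` loop: it runs at most twice when c occurs in the
-- original string (after a reset the find succeeds) and loops forever otherwise;
-- the fuel of 2 only makes the port total — fuel exhaustion is unreachable inside
-- Pre_, and outside Pre_ the Python A diverges (excluded below).
def pvInnerA (original : List Char) (c : Char) : Nat → List Char × Int → List Char × Int
  | 0, st => st
  | fuel + 1, (al, total) =>
    let loc : Int := PySem.Chars.find al [c]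
    if loc > -1 then
      (PySem.List.slice al (some (loc + 1)) none, total)
    else
      pvInnerA original c fuel (original, total + 1)

def get_passes (alpha : String) (h_ : String) : Int :=
  let original := alpha.toList
  (h_.toList.foldl (fun st c => pvInnerA original c 2 st) (alpha.toList, 1)).2

-- ===== PORT B =====
-- the position index: pos.setdefault(ch, []).append(i) over enumerate(alpha)
def pvPosDict (s : List Char) : PySem.Dict Char (List Int) :=
  (PySem.List.enumerate s 0).foldl
    (fun d p => d.insert p.2 (d.getD p.2 [] ++ [p.1])) PySem.Dict.empty

-- Source B's hand-written `_bisect_left` is verbatim CPython's bisect_left lo/hi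
-- halving loop; it is ported as the prelude's PySem.List.bisectLeft (same loop).
-- lst[0] / lst[lo] are in range inside Pre_; List.getD only makes the port total.
def pvStepB (pos : PySem.Dict Char (List Int)) (st : Int × Int) (c : Char) : Int × Int :=
  let lst := pos.getD c []
  let lo := PySem.List.bisectLeft lst st.2
  if lo = lst.length then (st.1 + 1, lst.getD 0 0 + 1)
  else (st.1, lst.getD lo 0 + 1)

def get_passes_alt (alpha : String) (h_ : String) : Int :=
  let pos := pvPosDict alpha.toList
  (h_.toList.foldl (pvStepB pos) (1, 0)).1

-- ===== PRECONDITION & SPEC =====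
-- Pre_ excludes exactly the inputs on which some character of h_ never occurs in
-- alpha: there A's while loop resets forever and never returns (divergence).
def Pre_get_passes (alpha : String) (h_ : String) : Prop :=
  (h_.toList.all (fun c => alpha.toList.contains c)) = true
instance (alpha : String) (h_ : String) : Decidable (Pre_get_passes alpha h_) := by
  unfold Pre_get_passes; infer_instance

def pvWitness_get_passes : String × String := ("ab", "aba")

def Spec_get_passes (alpha : String) (h_ : String) (out : Int) : Prop := out = get_passes_alt alpha h_
instance (alpha : String) (h_ : String) (out : Int) : Decidable (Spec_get_passes alpha h_ out) := by unfold Spec_get_passes; infer_instance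

-- ===== CLAIM (what is proved, stated in full; the proofs are below) =====
def Claim_equal_get_passes : Prop := ∀ (alpha : String) (h_ : String), Dom_get_passes alpha h_ → Pre_get_passes alpha h_ → Spec_get_passes alpha h_ (get_passes alpha h_)

-- ===== LEMMAS AND PROOFS =====

theorem foldgen (ps : List (Int × Char)) (d : PySem.Dict Char (List Int)) (c : Char) :
    (ps.foldl (fun d p => d.insert p.2 (d.getD p.2 [] ++ [p.1])) d).getD c []
      = d.getD c [] ++ (ps.filter (fun p => p.2 == c)).map (·.1) := by
  induction ps generalizing d with
  | nil => simp
  | cons p ps ih =>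
    simp only [List.foldl_cons, ih, List.filter_cons]
    by_cases h : p.2 = c
    · subst h; simp
    · have h2 : (p.2 == c) = false := by simp [h]
      have h3 : ¬ c = p.2 := fun hh => h hh.symm
      simp [h2, PySem.Dict.getD_insert, h3]

theorem pvPosDict_getD (s : List Char) (c : Char) :
    (pvPosDict s).getD c []
      = ((PySem.List.enumerate s 0).filter (fun p => p.2 == c)).map (·.1) := by
  unfold pvPosDict; rw [foldgen]; simp

theorem pv_mem_posList (s : List Char) (c : Char) (x : Int) :
    x ∈ (pvPosDict s).getD c [] ↔ ∃ m : Nat, ∃ _ : m < s.length, s[m] = c ∧ x = (m : Int) := by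
  rw [pvPosDict_getD]
  simp only [List.mem_map, List.mem_filter, PySem.List.mem_enumerate_iff]
  constructor
  · rintro ⟨p, ⟨⟨k, hk, rfl⟩, hc⟩, rfl⟩
    exact ⟨k, hk, by simpa using hc, by simp⟩
  · rintro ⟨m, hm, hc, rfl⟩
    exact ⟨((m:Int), c), ⟨⟨m, hm, by simp [hc]⟩, by simp⟩, rfl⟩

theorem pv_sorted_posList (s : List Char) (c : Char) :
    ((pvPosDict s).getD c []).Pairwise (· < ·) := by
  rw [pvPosDict_getD]
  apply List.Pairwise.map
  · exact fun a b h => h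
  · exact (PySem.List.pairwise_lt_enumerate s 0).filter _

theorem pv_singleton_prefix_drop (l : List Char) (c : Char) (i : Nat) :
    [c] <+: l.drop i ↔ ∃ _ : i < l.length, l[i] = c := by
  constructor
  · rintro ⟨t, ht⟩
    have hlen : i < l.length := by
      by_contra h
      have : l.drop i = [] := List.drop_eq_nil_of_le (by omega)
      rw [this] at ht; simp at ht
    refine ⟨hlen, ?_⟩
    have h0 : (l.drop i)[0]? = some c := by rw [← ht]; simp
    have : l[i]? = some c := by simpa [List.getElem?_drop] using h0
    simpa [List.getElem?_eq_getElem hlen] using this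
  · rintro ⟨h, hc⟩
    refine ⟨l.drop (i+1), ?_⟩
    have := List.getElem_cons_drop (as := l) (i := i) h
    simpa [hc] using this

-- characterize find of a single char when present

theorem pv_find_singleton (l : List Char) (c : Char) (h : c ∈ l) :
    ∃ j : Nat, ∃ _ : j < l.length, PySem.Chars.find l [c] = (j : Int) ∧ l[j] = c ∧
      ∀ i, i < j → ∀ (hi : i < l.length), l[i] ≠ c := by
  have hinf : [c] <:+: l := by
    obtain ⟨s1, t1, rfl⟩ := List.mem_iff_append.mp h
    exact ⟨s1, t1, by simp⟩
  have hnn : 0 ≤ PySem.Chars.find l [c] := (PySem.Chars.find_nonneg_iff l [c]).mpr hinf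
  obtain ⟨hpre, hmin⟩ := PySem.Chars.find_spec hnn
  obtain ⟨hlt, hget⟩ := (pv_singleton_prefix_drop l c _).mp hpre
  refine ⟨(PySem.Chars.find l [c]).toNat, hlt, by omega, hget, ?_⟩
  intro i hi hil hcontra
  exact hmin i hi ((pv_singleton_prefix_drop l c i).mpr ⟨hil, hcontra⟩)

theorem pv_mem_drop (s : List Char) (k : Nat) (c : Char) :
    c ∈ s.drop k ↔ ∃ m : Nat, k ≤ m ∧ ∃ _ : m < s.length, s[m] = c := by
  constructor
  · intro h
    obtain ⟨i, hi, hg⟩ := List.mem_iff_getElem.mp h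
    refine ⟨k + i, by omega, by simp at hi; omega, ?_⟩
    simpa [List.getElem_drop] using hg
  · rintro ⟨m, hkm, hm, hg⟩
    have hlen : m - k < (s.drop k).length := by simp; omega
    have : (s.drop k)[m - k] = c := by
      rw [List.getElem_drop]
      have : k + (m - k) = m := by omega
      simp [this, hg]
    exact this ▸ List.getElem_mem hlen

theorem pv_mono (lst : List Int) (hs : lst.Pairwise (· < ·)) (i j : Nat)
    (hi : i < lst.length) (hj : j < lst.length) (hij : i ≤ j) : lst[i] ≤ lst[j] := by
  rcases Nat.lt_or_ge i j with h | h
  · exact le_of_lt ((List.pairwise_iff_getElem.mp hs) i j hi hj h)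
  · have : i = j := by omega
    subst this; exact le_refl _

theorem pv_mem_posList' (s : List Char) (c : Char) (x : Int) :
    x ∈ (pvPosDict s).getD c [] ↔ ∃ m : Nat, s[m]? = some c ∧ x = (m : Int) := by
  rw [pv_mem_posList]
  constructor
  · rintro ⟨m, hm, hg, rfl⟩; exact ⟨m, by simp [List.getElem?_eq_getElem hm, hg], rfl⟩
  · rintro ⟨m, hg, rfl⟩
    obtain ⟨hm, hg'⟩ := List.getElem?_eq_some_iff.mp hg
    exact ⟨m, hm, hg', rfl⟩

theorem pv_mem_drop' (s : List Char) (k : Nat) (c : Char) :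
    c ∈ s.drop k ↔ ∃ m : Nat, k ≤ m ∧ s[m]? = some c := by
  rw [pv_mem_drop]
  constructor
  · rintro ⟨m, hkm, hm, hg⟩; exact ⟨m, hkm, by simp [List.getElem?_eq_getElem hm, hg]⟩
  · rintro ⟨m, hkm, hg⟩
    obtain ⟨hm, hg'⟩ := List.getElem?_eq_some_iff.mp hg
    exact ⟨m, hkm, hm, hg'⟩

theorem pv_find_singleton' (l : List Char) (c : Char) (h : c ∈ l) :
    ∃ j : Nat, PySem.Chars.find l [c] = (j : Int) ∧ l[j]? = some c ∧
      ∀ i, i < j → l[i]? ≠ some c := by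
  obtain ⟨j, hj, hfind, hg, hmin⟩ := pv_find_singleton l c h
  refine ⟨j, hfind, by simp [List.getElem?_eq_getElem hj, hg], ?_⟩
  intro i hi hcon
  obtain ⟨hil, hg'⟩ := List.getElem?_eq_some_iff.mp hcon
  exact hmin i hi hil hg'

theorem pv_step (s : List Char) (c : Char) (k : Nat) (t : Int)
    (hk : k ≤ s.length) (hc : c ∈ s) :
    ∃ k' : Nat, k' ≤ s.length ∧
      pvInnerA s c 2 (s.drop k, t) = (s.drop k', (pvStepB (pvPosDict s) (t, (k : Int)) c).1) ∧
      (pvStepB (pvPosDict s) (t, (k : Int)) c).2 = (k' : Int) := by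
  have hsorted := pv_sorted_posList s c
  have hsle : ((pvPosDict s).getD c []).Pairwise (· ≤ ·) := hsorted.imp le_of_lt
  obtain ⟨hlo_le, hlo_lt, hlo_ge⟩ := PySem.List.bisectLeft_spec ((pvPosDict s).getD c []) (k:Int) hsle
  set lst := (pvPosDict s).getD c [] with hlstdef
  set lo := PySem.List.bisectLeft lst (k:Int) with hlodef
  by_cases hmem : c ∈ s.drop k
  · -- find succeeds in s.drop k at offset j; absolute position p = k + j
    obtain ⟨j, hfind, hgj, hminj⟩ := pv_find_singleton' (s.drop k) c hmem
    rw [List.getElem?_drop] at hgj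
    have hjlen : k + j < s.length := (List.getElem?_eq_some_iff.mp hgj).1
    have hpm : ((k+j : Nat) : Int) ∈ lst := (pv_mem_posList' s c _).mpr ⟨k+j, hgj, rfl⟩
    obtain ⟨ip, hip, hipg⟩ := List.mem_iff_getElem.mp hpm
    have hiplo : lo ≤ ip := by
      by_contra hcon
      have := hlo_lt ip hip (by omega)
      rw [hipg] at this; push_cast at this; omega
    have hlo_lt_len : lo < lst.length := by omega
    have hplo : lst[lo] = ((k+j : Nat) : Int) := by
      have hle : lst[lo] ≤ lst[ip] := pv_mono lst hsorted lo ip hlo_lt_len hip hiplo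
      rw [hipg] at hle
      obtain ⟨m, hsm, hmEq⟩ := (pv_mem_posList' s c _).mp (List.getElem_mem hlo_lt_len)
      have hkm : (k:Int) ≤ lst[lo] := hlo_ge lo hlo_lt_len (le_refl _)
      have hkm' : k ≤ m := by rw [hmEq] at hkm; exact_mod_cast hkm
      have hge : k + j ≤ m := by
        by_contra hcon
        have hlt : m - k < j := by omega
        have : s[k + (m - k)]? = some c := by
          have hh : k + (m - k) = m := by omega
          rw [hh]; exact hsm
        exact hminj (m - k) hlt (by rwa [List.getElem?_drop])
      rw [hmEq]; push_cast; omega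
    refine ⟨k + j + 1, by omega, ?_, ?_⟩
    · -- A side
      have hApos : PySem.Chars.find (s.drop k) [c] > -1 := by rw [hfind]; omega
      have hSlice : PySem.List.slice (s.drop k) (some (PySem.Chars.find (s.drop k) [c] + 1)) none
          = s.drop (k + j + 1) := by
        rw [hfind]
        have : ((j:Int) + 1) = ((j+1 : Nat) : Int) := by push_cast; ring
        rw [this, PySem.List.slice_from_natCast, List.drop_drop]
        congr 1
      have hBval : (pvStepB (pvPosDict s) (t, (k : Int)) c).1 = t := by
        simp only [pvStepB, ← hlstdef, ← hlodef]
        have : ¬ lo = lst.length := by omega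
        simp [this]
      rw [hBval]
      simp only [pvInnerA]
      rw [if_pos hApos, hSlice]
    · -- B side cursor
      simp only [pvStepB, ← hlstdef, ← hlodef]
      have hne : ¬ lo = lst.length := by omega
      rw [if_neg hne]
      show lst.getD lo 0 + 1 = _
      rw [List.getD_eq_getElem lst 0 hlo_lt_len, hplo]
      push_cast; ring
  · -- find fails; reset and find in original s
    have hfail : PySem.Chars.find (s.drop k) [c] = -1 := by
      rw [PySem.Chars.find_eq_neg_one_iff]
      intro hinf
      exact hmem (hinf.subset (by simp))
    obtain ⟨j0, hfind0, hg0, hmin0⟩ := pv_find_singleton' s c hc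
    have hj0len : j0 < s.length := (List.getElem?_eq_some_iff.mp hg0).1
    have hlo_eq : lo = lst.length := by
      by_contra hcon
      have hlt : lo < lst.length := by omega
      obtain ⟨m, hsm, hmEq⟩ := (pv_mem_posList' s c _).mp (List.getElem_mem hlt)
      have hkm : (k:Int) ≤ lst[lo] := hlo_ge lo hlt (le_refl _)
      have hkm' : k ≤ m := by rw [hmEq] at hkm; exact_mod_cast hkm
      exact hmem ((pv_mem_drop' s k c).mpr ⟨m, hkm', hsm⟩)
    -- lst[0] = j0
    have hj0m : ((j0:Nat):Int) ∈ lst := (pv_mem_posList' s c _).mpr ⟨j0, hg0, rfl⟩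
    have hnemp : 0 < lst.length := List.length_pos_of_mem hj0m
    have h0 : lst[0]'hnemp = ((j0:Nat):Int) := by
      obtain ⟨i0, hi0, hi0g⟩ := List.mem_iff_getElem.mp hj0m
      have hle : lst[0]'hnemp ≤ lst[i0] := pv_mono lst hsorted 0 i0 hnemp hi0 (Nat.zero_le _)
      rw [hi0g] at hle
      obtain ⟨m, hsm, hmEq⟩ := (pv_mem_posList' s c _).mp (List.getElem_mem hnemp)
      have hge : j0 ≤ m := by
        by_contra hcon
        exact hmin0 m (by omega) hsm
      rw [hmEq]; push_cast; omega
    refine ⟨j0 + 1, by omega, ?_, ?_⟩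
    · -- A side: first iteration fails, second succeeds on s
      have hApos0 : ¬ PySem.Chars.find (s.drop k) [c] > -1 := by rw [hfail]; omega
      have hApos1 : PySem.Chars.find s [c] > -1 := by rw [hfind0]; omega
      have hSlice : PySem.List.slice s (some (PySem.Chars.find s [c] + 1)) none
          = s.drop (j0 + 1) := by
        rw [hfind0]
        have : ((j0:Int) + 1) = ((j0+1 : Nat) : Int) := by omega
        rw [this, PySem.List.slice_from_natCast]
      have hBval : (pvStepB (pvPosDict s) (t, (k : Int)) c).1 = t + 1 := by
        simp only [pvStepB, ← hlstdef, ← hlodef]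
        rw [if_pos hlo_eq]
      rw [hBval]
      simp only [pvInnerA]
      rw [if_neg hApos0]
      rw [if_pos hApos1, hSlice]
    · simp only [pvStepB, ← hlstdef, ← hlodef]
      rw [if_pos hlo_eq]
      show lst.getD 0 0 + 1 = _
      rw [List.getD_eq_getElem lst 0 hnemp, h0]
      push_cast; ring

theorem pv_main (s : List Char) (hs : List Char) (k : Nat) (t : Int)
    (hk : k ≤ s.length) (hall : ∀ c ∈ hs, c ∈ s) :
    (hs.foldl (fun st c => pvInnerA s c 2 st) (s.drop k, t)).2
      = (hs.foldl (pvStepB (pvPosDict s)) (t, (k : Int))).1 := by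
  induction hs generalizing k t with
  | nil => simp
  | cons c hs ih =>
    obtain ⟨k', hk', hA, hB⟩ := pv_step s c k t hk (hall c (by simp))
    simp only [List.foldl_cons, hA]
    have hstep : pvStepB (pvPosDict s) (t, (k : Int)) c
        = ((pvStepB (pvPosDict s) (t, (k : Int)) c).1, (k' : Int)) := by
      rw [← hB]
    rw [hstep]
    exact ih k' _ hk' (fun d hd => hall d (by simp [hd]))

-- ===== VERDICT (by name: the statement is the Claim_ definition above) =====
theorem get_passes_spec : Claim_equal_get_passes := by
  intro alpha h_ _ hpre
  unfold Pre_get_passes at hpre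
  simp only [List.all_eq_true, List.contains_iff_mem] at hpre
  unfold Spec_get_passes get_passes get_passes_alt
  have := pv_main alpha.toList h_.toList 0 1 (Nat.zero_le _) hpre
  simpa using this
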